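-- pv_equiv track=rewrite | github.com/martin-papy/qdrant-loader | packages/qdrant-loader/src/qdrant_loader/utils/sensitive.py | _consume_input_value
-- ===== SOURCE A (Python) =====
-- def _consume_input_value(text: str, start: int) -> int:
--     """Consume the value that follows input_value=, handling nested structures."""
--     if start >= len(text):
--         return start
--
--     ch = text[start]
--
--     # Quoted scalar
--     if ch in "'\"":
--         quote = ch
--         i = start + 1
--         escaped = False
--         while i < len(text):
--             cur = text[i]
--             if escaped:
--                 escaped = False
--             elif cur == "\\":
--                 escaped = True
--             elif cur == quote:
--                 return i + 1
--             i += 1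
--         return i
--
--     # Nested dict/list structures
--     if ch in "[{":
--         stack = ["]" if ch == "[" else "}"]
--         i = start + 1
--         in_quote = ""
--         escaped = False
--
--         while i < len(text) and stack:
--             cur = text[i]
--
--             if in_quote:
--                 if escaped:
--                     escaped = False
--                 elif cur == "\\":
--                     escaped = True
--                 elif cur == in_quote:
--                     in_quote = ""
--             else:
--                 if cur in "'\"":
--                     in_quote = cur
--                 elif cur in "[{":
--                     stack.append("]" if cur == "[" else "}")
--                 elif cur in "]}" and stack and cur == stack[-1]:
--                     stack.pop()
--             i += 1
--
--         return i
--
--     # Unquoted scalar value: consume until delimiter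
--     i = start
--     while i < len(text) and text[i] not in ",\n":
--         i += 1
--     return i
-- ===== SOURCE B (Python) =====
-- def _eat_quoted(rem, q):
--     # rem is a stack of the remaining characters (next character on top); consume
--     # through the closing quote, treating a popped backslash as escaping the next char.
--     while rem:
--         c = rem.pop()
--         if c == "\\":
--             if rem:
--                 rem.pop()
--         elif c == q:
--             return
--
--
-- def _eat_nested(rem, close):
--     # Consume one bracketed value: each nested quoted or bracketed value is eaten by
--     # a recursive call; a non-matching closer is just consumed like any other char.
--     while rem:
--         c = rem.pop()
--         if c in "'\"":
--             _eat_quoted(rem, c)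
--         elif c == "[":
--             _eat_nested(rem, "]")
--         elif c == "{":
--             _eat_nested(rem, "}")
--         elif c == close:
--             return
--
--
-- def _eat_bare(rem):
--     while rem and rem[-1] not in ",\n":
--         rem.pop()
--
--
-- def _consume_input_value(text: str, start: int) -> int:
--     n = len(text)
--     if start >= n:
--         return start
--     rem = list(text[start:])
--     rem.reverse()  # stack of remaining characters, next one on top
--     ch = rem[-1]
--     if ch in "'\"":
--         rem.pop()
--         _eat_quoted(rem, ch)
--     elif ch in "[{":
--         rem.pop()
--         _eat_nested(rem, "]" if ch == "[" else "}")
--     else: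
--         _eat_bare(rem)
--     return n - len(rem)
-- ===== Notes on version B (the rewrite author's own statement) =====
-- stated objective: alternative
-- what changed: B consumes the input destructively from a reversed character stack (list(text[start:]) reversed, pop from the top) instead of scanning by index: quoted scalars and each nested bracketed value are eaten by helper calls (recursion per nested value replaces A's explicit closer stack and in_quote/escaped flags), and the result is n minus the characters left on the stack.
-- outside the precondition, e.g. on _consume_input_value('a,c', -2): A returns -2, B returns 1; on _consume_input_value('abc', -10): A raises IndexError, B returns 3
import Mathlib
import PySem

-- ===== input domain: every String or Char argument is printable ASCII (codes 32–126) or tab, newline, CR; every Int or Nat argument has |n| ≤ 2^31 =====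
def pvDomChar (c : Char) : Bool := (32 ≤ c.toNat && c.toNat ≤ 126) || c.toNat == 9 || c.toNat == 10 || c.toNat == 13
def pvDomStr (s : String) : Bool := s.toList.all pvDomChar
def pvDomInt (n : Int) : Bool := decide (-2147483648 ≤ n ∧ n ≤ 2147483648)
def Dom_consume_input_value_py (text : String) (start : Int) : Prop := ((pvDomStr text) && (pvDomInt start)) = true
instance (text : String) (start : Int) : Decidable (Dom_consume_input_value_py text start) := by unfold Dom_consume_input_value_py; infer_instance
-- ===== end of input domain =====

-- B replaces A's index scan (explicit closer stack + in_quote/escaped flags) by a destructive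
-- stack of the remaining characters: helpers pop one nested value per call and the result is
-- n - (characters left). Same return value; no speed claim (objective: alternative).
-- Loops/recursion are ported structurally; the nested-value recursion gets a fuel argument
-- (fuel = length of the text is sufficient: every step consumes at least one character).

-- ===== PORT A =====
-- Python's quoted-scalar while loop (indices are Nat; exact for the non-negative starts Pre_ admits).
def aQuoted (cs : List Char) (quote : Char) : Nat → Nat → Bool → Nat
  | 0, i, _ => i
  | fuel + 1, i, escaped =>
    if h : i < cs.length then
      if escaped then aQuoted cs quote fuel (i + 1) false
      else if cs[i] = '\\' then aQuoted cs quote fuel (i + 1) true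
      else if cs[i] = quote then i + 1
      else aQuoted cs quote fuel (i + 1) false
    else i

-- Python's bracket while loop; the Python list used as a stack (append / [-1] / pop at the right
-- end) is ported as a Lean list with its head as the stack top.
def aBracket (cs : List Char) : Nat → Nat → List Char → Option Char → Bool → Nat
  | 0, i, _, _, _ => i
  | fuel + 1, i, stack, inq, esc =>
    if h : i < cs.length ∧ stack ≠ [] then
      match inq with
      | some q =>
        if esc then aBracket cs fuel (i + 1) stack (some q) false
        else if cs[i]'h.1 = '\\' then aBracket cs fuel (i + 1) stack (some q) true
        else if cs[i]'h.1 = q then aBracket cs fuel (i + 1) stack none false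
        else aBracket cs fuel (i + 1) stack (some q) false
      | none =>
        if cs[i]'h.1 = '\'' ∨ cs[i]'h.1 = '"' then aBracket cs fuel (i + 1) stack (some (cs[i]'h.1)) esc
        else if cs[i]'h.1 = '[' then aBracket cs fuel (i + 1) (']' :: stack) none esc
        else if cs[i]'h.1 = '{' then aBracket cs fuel (i + 1) ('}' :: stack) none esc
        else if (cs[i]'h.1 = ']' ∨ cs[i]'h.1 = '}') ∧ stack.head? = some (cs[i]'h.1) then
          aBracket cs fuel (i + 1) stack.tail none esc
        else aBracket cs fuel (i + 1) stack none esc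
    else i

-- Python's unquoted-scalar while loop.
def aBare (cs : List Char) : Nat → Nat → Nat
  | 0, i => i
  | fuel + 1, i =>
    if h : i < cs.length then
      if cs[i] = ',' ∨ cs[i] = '\n' then i else aBare cs fuel (i + 1)
    else i

def consume_input_value_py (text : String) (start : Int) : Int :=
  let cs := text.toList
  if start ≥ (cs.length : Int) then start
  else
    let s := start.toNat
    if _h : s < cs.length then
      if cs[s] = '\'' ∨ cs[s] = '"' then (aQuoted cs (cs[s]) cs.length (s + 1) false : Int)
      else if cs[s] = '[' ∨ cs[s] = '{' then
        (aBracket cs cs.length (s + 1) [if cs[s] = '[' then ']' else '}'] none false : Int)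
      else (aBare cs cs.length s : Int)
    else start  -- unreachable for 0 ≤ start (Pre_)

-- ===== PORT B =====
-- Source B keeps the remaining characters on a stack (list(text[start:]) reversed, popped from the
-- right end); the port models that stack by the remaining suffix list read top-first, so
-- rem.pop() = taking the head, len(rem) = List.length.

-- Source B _eat_quoted: pop through the closing quote; a popped backslash discards the next char.
def bEatQuoted (q : Char) (s : List Char) : List Char :=
  match s with
  | [] => []
  | c :: r =>
    if c = '\\' then bEatQuoted q r.tail
    else if c = q then r
    else bEatQuoted q r
termination_by s.length
decreasing_by
  all_goals simp [List.length_tail]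

-- Source B _eat_nested: pop one bracketed value; each nested quoted/bracketed value is eaten by a
-- recursive call. Fuel (text length at the call site) only realises Python's termination: every
-- step pops at least one character, so fuel ≥ stack size is never exhausted.
def bEatNested (close : Char) : Nat → List Char → List Char
  | 0, r => r
  | _ + 1, [] => []
  | f + 1, c :: r =>
    if c = '\'' ∨ c = '"' then bEatNested close f (bEatQuoted c r)
    else if c = '[' then bEatNested close f (bEatNested ']' f r)
    else if c = '{' then bEatNested close f (bEatNested '}' f r)
    else if c = close then r
    else bEatNested close f r

-- Source B _eat_bare: pop until a delimiter is on top of the stack.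
def bEatBare : List Char → List Char
  | [] => []
  | c :: r => if c = ',' ∨ c = '\n' then c :: r else bEatBare r

def consume_input_value_py_alt (text : String) (start : Int) : Int :=
  let cs := text.toList
  if start ≥ (cs.length : Int) then start
  else
    match cs.drop start.toNat with   -- list(text[start:]) as a stack, next char first; exact for the 0 ≤ start Pre_ admits
    | [] => start  -- unreachable for 0 ≤ start (Pre_)
    | ch :: r =>
      if ch = '\'' ∨ ch = '"' then (cs.length : Int) - ((bEatQuoted ch r).length : Int)
      else if ch = '[' ∨ ch = '{' then
        (cs.length : Int) - ((bEatNested (if ch = '[' then ']' else '}') cs.length r).length : Int)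
      else (cs.length : Int) - ((bEatBare (ch :: r)).length : Int)

-- ===== PRECONDITION & SPEC =====
-- Pre_ restricts to the helper's natural domain of non-negative start positions: for negative
-- start A either raises IndexError (start < -len) or applies Python's negative-index wraparound
-- (and can even return the negative index itself from the bare branch), an artefact B does not
-- reproduce; the ports use Nat indices/suffixes, exact for 0 ≤ start.
def Pre_consume_input_value_py (text : String) (start : Int) : Prop := 0 ≤ start
instance (text : String) (start : Int) : Decidable (Pre_consume_input_value_py text start) := by
  unfold Pre_consume_input_value_py; infer_instance

def pvWitness_consume_input_value_py : String × Int := ("{'k': [1, \"a]\"], 'm': 2}, rest", 0)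

def Spec_consume_input_value_py (text : String) (start : Int) (out : Int) : Prop :=
  out = consume_input_value_py_alt text start
instance (text : String) (start : Int) (out : Int) : Decidable (Spec_consume_input_value_py text start out) := by
  unfold Spec_consume_input_value_py; infer_instance

-- ===== CLAIM (what is proved, stated in full; the proofs are below) =====
def Claim_equal_consume_input_value_py : Prop := ∀ (text : String) (start : Int), Dom_consume_input_value_py text start → Pre_consume_input_value_py text start → Spec_consume_input_value_py text start (consume_input_value_py text start)

-- ===== LEMMAS AND PROOFS =====
-- Proof-side index scanners: the common yardstick both ports are reduced to. iQuoted/iNested/iBare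
-- scan by index exactly like B's stack helpers (iNested recursing per nested value); A's loops are
-- proved equal to them, and B's suffix-consuming helpers are proved to land on the same indices.

def iQuoted (cs : List Char) (q : Char) : Nat → Nat → Nat
  | 0, _ => cs.length
  | fuel + 1, i =>
    if h : i < cs.length then
      if cs[i] = '\\' then iQuoted cs q fuel (i + 2)
      else if cs[i] = q then i + 1
      else iQuoted cs q fuel (i + 1)
    else cs.length

def iNested (cs : List Char) (close : Char) : Nat → Nat → Nat
  | 0, _ => cs.length
  | fuel + 1, i =>
    if h : i < cs.length then
      if cs[i] = '\'' ∨ cs[i] = '"' then iNested cs close fuel (iQuoted cs (cs[i]) fuel (i + 1))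
      else if cs[i] = '[' then iNested cs close fuel (iNested cs ']' fuel (i + 1))
      else if cs[i] = '{' then iNested cs close fuel (iNested cs '}' fuel (i + 1))
      else if cs[i] = close then i + 1
      else iNested cs close fuel (i + 1)
    else cs.length

def iBare (cs : List Char) : Nat → Nat → Nat
  | 0, i => i
  | fuel + 1, i =>
    if h : i < cs.length then
      if cs[i] = ',' ∨ cs[i] = '\n' then i else iBare cs fuel (i + 1)
    else i

theorem iQuoted_past (cs : List Char) (q : Char) : ∀ f i, cs.length ≤ i → iQuoted cs q f i = cs.length := by
  intro f i hi
  cases f with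
  | zero => rfl
  | succ f => rw [iQuoted, dif_neg (by omega)]

theorem iQuoted_le (cs : List Char) (q : Char) : ∀ f i, iQuoted cs q f i ≤ cs.length := by
  intro f
  induction f with
  | zero => intro i; exact le_refl _
  | succ f ih =>
    intro i
    rw [iQuoted]
    split
    · split
      · exact ih (i + 2)
      · split
        · omega
        · exact ih (i + 1)
    · exact le_refl _

theorem iQuoted_ge (cs : List Char) (q : Char) : ∀ f i, i ≤ cs.length → i ≤ iQuoted cs q f i := by
  intro f
  induction f with
  | zero => intro i hi; exact hi
  | succ f ih =>
    intro i hi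
    rw [iQuoted]
    split
    · rename_i h
      split
      · by_cases h2 : i + 2 ≤ cs.length
        · have := ih (i + 2) h2; omega
        · rw [iQuoted_past cs q f (i + 2) (by omega)]; omega
      · split
        · omega
        · have := ih (i + 1) (by omega); omega
    · exact hi

theorem iQuoted_fuel (cs : List Char) (q : Char) :
    ∀ f g i, cs.length ≤ i + f → cs.length ≤ i + g → iQuoted cs q f i = iQuoted cs q g i := by
  intro f
  induction f with
  | zero =>
    intro g i hf hg
    rw [show iQuoted cs q 0 i = cs.length from rfl, iQuoted_past cs q g i (by omega)]
  | succ f ih =>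
    intro g i hf hg
    by_cases hi : i < cs.length
    · cases g with
      | zero => omega
      | succ g =>
        rw [iQuoted, iQuoted, dif_pos hi, dif_pos hi]
        split
        · exact ih g (i + 2) (by omega) (by omega)
        · split
          · rfl
          · exact ih g (i + 1) (by omega) (by omega)
    · rw [iQuoted_past cs q _ i (by omega), iQuoted_past cs q _ i (by omega)]

theorem iNested_past (cs : List Char) (c : Char) : ∀ f i, cs.length ≤ i → iNested cs c f i = cs.length := by
  intro f i hi
  cases f with
  | zero => rfl
  | succ f => rw [iNested, dif_neg (by omega)]

theorem iNested_le (cs : List Char) (c : Char) : ∀ f i, iNested cs c f i ≤ cs.length := by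
  intro f
  induction f with
  | zero => intro i; exact le_refl _
  | succ f ih =>
    intro i
    rw [iNested]
    split
    · split
      · exact ih _
      · split
        · exact ih _
        · split
          · exact ih _
          · split
            · omega
            · exact ih _
    · exact le_refl _

theorem iNested_ge (cs : List Char) : ∀ f (c : Char) i, i ≤ cs.length → i ≤ iNested cs c f i := by
  intro f
  induction f with
  | zero => intro c i hi; exact hi
  | succ f ih =>
    intro c i hi
    rw [iNested]
    split
    · rename_i h
      split
      · have h1 : i + 1 ≤ iQuoted cs (cs[i]) f (i + 1) := iQuoted_ge cs _ f (i + 1) (by omega)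
        have h2 := ih c (iQuoted cs (cs[i]) f (i + 1)) (iQuoted_le cs _ f (i + 1))
        omega
      · split
        · have h1 : i + 1 ≤ iNested cs ']' f (i + 1) := ih ']' (i + 1) (by omega)
          have h2 := ih c (iNested cs ']' f (i + 1)) (iNested_le cs ']' f (i + 1))
          omega
        · split
          · have h1 : i + 1 ≤ iNested cs '}' f (i + 1) := ih '}' (i + 1) (by omega)
            have h2 := ih c (iNested cs '}' f (i + 1)) (iNested_le cs '}' f (i + 1))
            omega
          · split
            · omega
            · have := ih c (i + 1) (by omega); omega
    · exact hi

theorem iNested_fuel (cs : List Char) (c : Char) :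
    ∀ f g i, cs.length ≤ i + f → cs.length ≤ i + g → iNested cs c f i = iNested cs c g i := by
  intro f
  induction f generalizing c with
  | zero =>
    intro g i hf hg
    rw [show iNested cs c 0 i = cs.length from rfl, iNested_past cs c g i (by omega)]
  | succ f ih =>
    intro g i hf hg
    by_cases hi : i < cs.length
    · cases g with
      | zero => omega
      | succ g =>
        rw [iNested, iNested, dif_pos hi, dif_pos hi]
        split
        · rw [iQuoted_fuel cs (cs[i]) f g (i + 1) (by omega) (by omega)]
          have h1 : i + 1 ≤ iQuoted cs (cs[i]) g (i + 1) := iQuoted_ge cs _ g (i + 1) (by omega)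
          exact ih c g _ (by omega) (by omega)
        · split
          · rw [ih ']' g (i + 1) (by omega) (by omega)]
            have h1 : i + 1 ≤ iNested cs ']' g (i + 1) := iNested_ge cs g ']' (i + 1) (by omega)
            exact ih c g _ (by omega) (by omega)
          · split
            · rw [ih '}' g (i + 1) (by omega) (by omega)]
              have h1 : i + 1 ≤ iNested cs '}' g (i + 1) := iNested_ge cs g '}' (i + 1) (by omega)
              exact ih c g _ (by omega) (by omega)
            · split
              · rfl
              · exact ih c g (i + 1) (by omega) (by omega)
    · rw [iNested_past cs c _ i (by omega), iNested_past cs c _ i (by omega)]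

-- one canonical-fuel step of iNested
theorem iNested_step (cs : List Char) (c : Char) (i : Nat) (hi : i < cs.length) :
    iNested cs c cs.length i =
      if cs[i] = '\'' ∨ cs[i] = '"' then iNested cs c cs.length (iQuoted cs (cs[i]) cs.length (i + 1))
      else if cs[i] = '[' then iNested cs c cs.length (iNested cs ']' cs.length (i + 1))
      else if cs[i] = '{' then iNested cs c cs.length (iNested cs '}' cs.length (i + 1))
      else if cs[i] = c then i + 1
      else iNested cs c cs.length (i + 1) := by
  have hL : ∃ f, cs.length = f + 1 := ⟨cs.length - 1, by omega⟩
  obtain ⟨f, hf⟩ := hL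
  conv_lhs => rw [hf, iNested, dif_pos (hf ▸ hi)]
  split
  · rw [iQuoted_fuel cs (cs[i]) f cs.length (i + 1) (by omega) (by omega)]
    have h1 : i + 1 ≤ iQuoted cs (cs[i]) cs.length (i + 1) := iQuoted_ge cs _ _ (i + 1) (by omega)
    have h2 := iQuoted_le cs (cs[i]) cs.length (i + 1)
    exact iNested_fuel cs c f cs.length _ (by omega) (by omega)
  · split
    · rw [iNested_fuel cs ']' f cs.length (i + 1) (by omega) (by omega)]
      have h1 : i + 1 ≤ iNested cs ']' cs.length (i + 1) := iNested_ge cs _ ']' (i + 1) (by omega)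
      have h2 := iNested_le cs ']' cs.length (i + 1)
      exact iNested_fuel cs c f cs.length _ (by omega) (by omega)
    · split
      · rw [iNested_fuel cs '}' f cs.length (i + 1) (by omega) (by omega)]
        have h1 : i + 1 ≤ iNested cs '}' cs.length (i + 1) := iNested_ge cs _ '}' (i + 1) (by omega)
        have h2 := iNested_le cs '}' cs.length (i + 1)
        exact iNested_fuel cs c f cs.length _ (by omega) (by omega)
      · split
        · rfl
        · exact iNested_fuel cs c f cs.length (i + 1) (by omega) (by omega)

theorem iBare_le (cs : List Char) : ∀ f i, i ≤ cs.length → iBare cs f i ≤ cs.length := by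
  intro f
  induction f with
  | zero => intro i hi; exact hi
  | succ f ih =>
    intro i hi
    rw [iBare]
    split
    · split
      · omega
      · exact ih (i + 1) (by omega)
    · exact hi

theorem aQuoted_past (cs : List Char) (q : Char) :
    ∀ f i esc, cs.length ≤ i → aQuoted cs q f i esc = i := by
  intro f i esc hi
  cases f with
  | zero => rfl
  | succ f => rw [aQuoted, dif_neg (by omega)]

theorem aQuoted_eq_iQuoted (cs : List Char) (q : Char) :
    ∀ k f g i, cs.length - i ≤ k → cs.length ≤ i + f → cs.length ≤ i + g → i ≤ cs.length →
      aQuoted cs q f i false = iQuoted cs q g i := by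
  intro k
  induction k with
  | zero =>
    intro f g i hk hf hg hi
    rw [aQuoted_past cs q f i false (by omega), iQuoted_past cs q g i (by omega)]
    omega
  | succ k ih =>
    intro f g i hk hf hg hi
    by_cases h : i < cs.length
    · cases f with
      | zero => omega
      | succ f =>
        cases g with
        | zero => omega
        | succ g =>
          rw [aQuoted, iQuoted, dif_pos h, dif_pos h, if_neg (by simp : ¬(false = true))]
          by_cases hb : cs[i] = '\\'
          · rw [if_pos hb, if_pos hb]
            by_cases h2 : i + 1 < cs.length
            · cases f with
              | zero => omega
              | succ f =>
                rw [aQuoted, dif_pos h2, if_pos rfl]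
                exact ih f g (i + 1 + 1) (by omega) (by omega) (by omega) (by omega)
            · rw [aQuoted_past cs q f (i + 1) true (by omega),
                iQuoted_past cs q g (i + 2) (by omega)]
              omega
          · rw [if_neg hb, if_neg hb]
            by_cases hq : cs[i] = q
            · rw [if_pos hq, if_pos hq]
            · rw [if_neg hq, if_neg hq]
              exact ih f g (i + 1) (by omega) (by omega) (by omega) (by omega)
    · rw [aQuoted_past cs q _ i false (by omega), iQuoted_past cs q _ i (by omega)]
      omega

theorem aBracket_stuck (cs : List Char) :
    ∀ f i stack inq esc, ¬(i < cs.length ∧ stack ≠ []) → aBracket cs f i stack inq esc = i := by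
  intro f i stack inq esc hc
  cases f with
  | zero => rfl
  | succ f => rw [aBracket, dif_neg hc]

theorem aBracket_fuel (cs : List Char) :
    ∀ k f g i stack inq esc, cs.length - i ≤ k → cs.length ≤ i + f → cs.length ≤ i + g →
      aBracket cs f i stack inq esc = aBracket cs g i stack inq esc := by
  intro k
  induction k with
  | zero =>
    intro f g i stack inq esc hk hf hg
    rw [aBracket_stuck cs f i stack inq esc (fun hc => by omega),
      aBracket_stuck cs g i stack inq esc (fun hc => by omega)]
  | succ k ih =>
    intro f g i stack inq esc hk hf hg
    by_cases hc : i < cs.length ∧ stack ≠ []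
    · cases f with
      | zero => omega
      | succ f =>
        cases g with
        | zero => omega
        | succ g =>
          rw [aBracket, aBracket, dif_pos hc, dif_pos hc]
          cases inq with
          | some q =>
            simp only []
            split_ifs <;> exact ih f g (i + 1) _ _ _ (by omega) (by omega) (by omega)
          | none =>
            simp only []
            split_ifs <;> exact ih f g (i + 1) _ _ _ (by omega) (by omega) (by omega)
    · rw [aBracket_stuck cs f i stack inq esc hc, aBracket_stuck cs g i stack inq esc hc]

-- A's in-quote scanning inside the bracket loop equals skipping the quoted scalar with iQuoted.
theorem aBracket_quote (cs : List Char) :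
    ∀ k f i, cs.length - i ≤ k → cs.length ≤ i + f → i ≤ cs.length → ∀ q stack, stack ≠ [] →
      ∀ g fr, cs.length ≤ i + g → cs.length ≤ i + fr →
      aBracket cs f i stack (some q) false = aBracket cs fr (iQuoted cs q g i) stack none false := by
  intro k
  induction k with
  | zero =>
    intro f i hk hf hi q stack hs g fr hg hfr
    rw [aBracket_stuck cs f i stack (some q) false (fun hc => by omega),
      iQuoted_past cs q g i (by omega),
      aBracket_stuck cs fr cs.length stack none false (fun hc => by omega)]
    omega
  | succ k ih =>
    intro f i hk hf hi q stack hs g fr hg hfr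
    by_cases h : i < cs.length
    · cases f with
      | zero => omega
      | succ f =>
        cases g with
        | zero => omega
        | succ g =>
          conv_lhs => rw [aBracket]
          rw [dif_pos ⟨h, hs⟩]
          simp only []
          rw [if_neg (by simp : ¬(false = true))]
          by_cases hb : cs[i] = '\\'
          · rw [if_pos hb]
            conv_rhs => rw [iQuoted, dif_pos h, if_pos hb]
            by_cases h2 : i + 1 < cs.length
            · cases f with
              | zero => omega
              | succ f =>
                rw [aBracket, dif_pos ⟨h2, hs⟩]
                simp only []
                rw [if_pos trivial]
                exact ih f (i + 1 + 1) (by omega) (by omega) (by omega) q stack hs g fr (by omega) (by omega)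
            · rw [aBracket_stuck cs f (i + 1) stack (some q) true (fun hc => by omega),
                iQuoted_past cs q g (i + 2) (by omega),
                aBracket_stuck cs fr cs.length stack none false (fun hc => by omega)]
              omega
          · rw [if_neg hb]
            by_cases hq : cs[i] = q
            · rw [if_pos hq]
              conv_rhs => rw [iQuoted, dif_pos h, if_neg hb, if_pos hq]
              exact aBracket_fuel cs cs.length f fr (i + 1) stack none false (by omega) (by omega) (by omega)
            · rw [if_neg hq]
              conv_rhs => rw [iQuoted, dif_pos h, if_neg hb, if_neg hq]
              exact ih f (i + 1) (by omega) (by omega) (by omega) q stack hs g fr (by omega) (by omega)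
    · rw [aBracket_stuck cs f i stack (some q) false (fun hc => by omega),
        iQuoted_past cs q g i (by omega),
        aBracket_stuck cs fr cs.length stack none false (fun hc => by omega)]
      omega

-- folding iNested (at canonical fuel) over the stack, innermost (head) first
def applyStack (cs : List Char) (stack : List Char) (i : Nat) : Nat :=
  stack.foldl (fun j c => iNested cs c cs.length j) i

theorem applyStack_len (cs : List Char) : ∀ stack, applyStack cs stack cs.length = cs.length := by
  intro stack
  induction stack with
  | nil => rfl
  | cons c s ih =>
    show applyStack cs s (iNested cs c cs.length cs.length) = cs.length
    rw [iNested_past cs c cs.length cs.length (le_refl _), ih]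

theorem aBracket_eq_applyStack (cs : List Char) :
    ∀ k f i stack, cs.length - i ≤ k → cs.length ≤ i + f → i ≤ cs.length → stack ≠ [] →
      (∀ c ∈ stack, c = ']' ∨ c = '}') →
      aBracket cs f i stack none false = applyStack cs stack i := by
  intro k
  induction k with
  | zero =>
    intro f i stack hk hf hi hs hmem
    have hlen : i = cs.length := by omega
    subst hlen
    rw [applyStack_len, aBracket_stuck cs f cs.length stack none false (fun hc => by omega)]
  | succ k ih =>
    intro f i stack hk hf hi hs hmem
    by_cases h : i < cs.length
    · obtain ⟨c, s, rfl⟩ : ∃ c s, stack = c :: s := by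
        cases stack with
        | nil => exact absurd rfl hs
        | cons c s => exact ⟨c, s, rfl⟩
      have hc : c = ']' ∨ c = '}' := hmem c (List.mem_cons_self ..)
      cases f with
      | zero => omega
      | succ f =>
        conv_lhs => rw [aBracket]
        rw [dif_pos ⟨h, hs⟩]
        simp only []
        show _ = applyStack cs s (iNested cs c cs.length i)
        rw [iNested_step cs c i h]
        by_cases hq : cs[i] = '\'' ∨ cs[i] = '"'
        · rw [if_pos hq, if_pos hq]
          rw [aBracket_quote cs cs.length f (i + 1) (by omega) (by omega) (by omega) (cs[i])
            (c :: s) hs cs.length f (by omega) (by omega)]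
          have hj1 : i + 1 ≤ iQuoted cs (cs[i]) cs.length (i + 1) :=
            iQuoted_ge cs (cs[i]) cs.length (i + 1) (by omega)
          have hj2 : iQuoted cs (cs[i]) cs.length (i + 1) ≤ cs.length :=
            iQuoted_le cs (cs[i]) cs.length (i + 1)
          rw [ih f (iQuoted cs (cs[i]) cs.length (i + 1)) (c :: s) (by omega) (by omega) hj2 hs hmem]
          rfl
        · rw [if_neg hq, if_neg hq]
          by_cases hob : cs[i] = '['
          · rw [if_pos hob, if_pos hob]
            rw [ih f (i + 1) (']' :: c :: s) (by omega) (by omega) (by omega) (by simp)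
              (by
                intro x hx
                rcases List.mem_cons.mp hx with h' | h'
                · exact Or.inl h'
                · exact hmem x h')]
            rfl
          · rw [if_neg hob, if_neg hob]
            by_cases hoc : cs[i] = '{'
            · rw [if_pos hoc, if_pos hoc]
              rw [ih f (i + 1) ('}' :: c :: s) (by omega) (by omega) (by omega) (by simp)
                (by
                  intro x hx
                  rcases List.mem_cons.mp hx with h' | h'
                  · exact Or.inr h'
                  · exact hmem x h')]
              rfl
            · rw [if_neg hoc, if_neg hoc]
              by_cases hcl : cs[i] = c
              · rw [if_pos (⟨by rcases hc with h' | h' <;> rw [hcl, h'] <;> simp,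
                  by simp [hcl]⟩ :
                    (cs[i] = ']' ∨ cs[i] = '}') ∧ (c :: s).head? = some (cs[i]))]
                rw [if_pos hcl]
                simp only [List.tail_cons]
                cases s with
                | nil =>
                  rw [aBracket_stuck cs f (i + 1) [] none false (fun hcon => hcon.2 rfl)]
                  rfl
                | cons c2 s2 =>
                  rw [ih f (i + 1) (c2 :: s2) (by omega) (by omega) (by omega) (by simp)
                    (fun x hx => hmem x (List.mem_cons_of_mem c hx))]
              · rw [if_neg (fun hcon => hcl (by
                  have := hcon.2
                  simp only [List.head?_cons, Option.some.injEq] at this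
                  exact this.symm))]
                rw [if_neg hcl]
                rw [ih f (i + 1) (c :: s) (by omega) (by omega) (by omega) hs hmem]
                rfl
    · have hlen : i = cs.length := by omega
      subst hlen
      rw [applyStack_len, aBracket_stuck cs f cs.length stack none false (fun hc => by omega)]

theorem aBare_eq_iBare (cs : List Char) :
    ∀ f i, aBare cs f i = iBare cs f i := by
  intro f
  induction f with
  | zero => intro i; rfl
  | succ f ih =>
    intro i
    rw [aBare, iBare]
    split
    · split
      · rfl
      · exact ih (i + 1)
    · rfl

-- B's stack helpers land on the suffix at exactly the index the i-scanners compute.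

theorem bEatQuoted_nil (q : Char) : bEatQuoted q [] = [] := by rw [bEatQuoted]

theorem bEatQuoted_cons (q c : Char) (r : List Char) :
    bEatQuoted q (c :: r) =
      if c = '\\' then bEatQuoted q r.tail else if c = q then r else bEatQuoted q r := by
  rw [bEatQuoted]

theorem bEatQuoted_drop (cs : List Char) (q : Char) :
    ∀ f i, cs.length ≤ i + f → bEatQuoted q (cs.drop i) = cs.drop (iQuoted cs q f i) := by
  intro f
  induction f with
  | zero =>
    intro i hf
    rw [List.drop_eq_nil_of_le (by omega), bEatQuoted_nil,
      show iQuoted cs q 0 i = cs.length from rfl, List.drop_length]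
  | succ f ih =>
    intro i hf
    by_cases h : i < cs.length
    · rw [List.drop_eq_getElem_cons h, bEatQuoted_cons, iQuoted, dif_pos h]
      by_cases hb : cs[i] = '\\'
      · rw [if_pos hb, if_pos hb, List.tail_drop]
        exact ih (i + 2) (by omega)
      · rw [if_neg hb, if_neg hb]
        by_cases hq : cs[i] = q
        · rw [if_pos hq, if_pos hq]
        · rw [if_neg hq, if_neg hq]
          exact ih (i + 1) (by omega)
    · rw [List.drop_eq_nil_of_le (by omega), bEatQuoted_nil, iQuoted, dif_neg h, List.drop_length]

theorem bEatNested_drop (cs : List Char) :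
    ∀ f (close : Char) i, cs.length ≤ i + f →
      bEatNested close f (cs.drop i) = cs.drop (iNested cs close cs.length i) := by
  intro f
  induction f with
  | zero =>
    intro close i hf
    rw [List.drop_eq_nil_of_le (by omega), show bEatNested close 0 [] = [] from rfl,
      iNested_past cs close cs.length i (by omega), List.drop_length]
  | succ f ih =>
    intro close i hf
    by_cases h : i < cs.length
    · rw [List.drop_eq_getElem_cons h, bEatNested, iNested_step cs close i h]
      by_cases hq : cs[i] = '\'' ∨ cs[i] = '"'
      · rw [if_pos hq, if_pos hq,
          bEatQuoted_drop cs (cs[i]) cs.length (i + 1) (by omega)]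
        have hj1 : i + 1 ≤ iQuoted cs (cs[i]) cs.length (i + 1) :=
          iQuoted_ge cs _ cs.length (i + 1) (by omega)
        exact ih close _ (by omega)
      · rw [if_neg hq, if_neg hq]
        by_cases hob : cs[i] = '['
        · rw [if_pos hob, if_pos hob, ih ']' (i + 1) (by omega)]
          have hj1 : i + 1 ≤ iNested cs ']' cs.length (i + 1) :=
            iNested_ge cs cs.length ']' (i + 1) (by omega)
          exact ih close _ (by omega)
        · rw [if_neg hob, if_neg hob]
          by_cases hoc : cs[i] = '{'
          · rw [if_pos hoc, if_pos hoc, ih '}' (i + 1) (by omega)]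
            have hj1 : i + 1 ≤ iNested cs '}' cs.length (i + 1) :=
              iNested_ge cs cs.length '}' (i + 1) (by omega)
            exact ih close _ (by omega)
          · rw [if_neg hoc, if_neg hoc]
            by_cases hcl : cs[i] = close
            · rw [if_pos hcl, if_pos hcl]
            · rw [if_neg hcl, if_neg hcl]
              exact ih close (i + 1) (by omega)
    · rw [List.drop_eq_nil_of_le (by omega), show bEatNested close (f + 1) [] = [] from rfl,
        iNested_past cs close cs.length i (by omega), List.drop_length]

theorem bEatBare_drop (cs : List Char) :
    ∀ f i, cs.length ≤ i + f → bEatBare (cs.drop i) = cs.drop (iBare cs f i) := by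
  intro f
  induction f with
  | zero =>
    intro i hf
    rw [List.drop_eq_nil_of_le (by omega), show iBare cs 0 i = i from rfl,
      List.drop_eq_nil_of_le (by omega)]
    rw [bEatBare]
  | succ f ih =>
    intro i hf
    by_cases h : i < cs.length
    · rw [List.drop_eq_getElem_cons h, bEatBare, iBare, dif_pos h]
      by_cases hd : cs[i] = ',' ∨ cs[i] = '\n'
      · rw [if_pos hd, if_pos hd, ← List.drop_eq_getElem_cons h]
      · rw [if_neg hd, if_neg hd]
        exact ih (i + 1) (by omega)
    · rw [List.drop_eq_nil_of_le (by omega), iBare, dif_neg h,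
        List.drop_eq_nil_of_le (by omega)]
      rw [bEatBare]

-- ===== VERDICT (by name: the statement is the Claim_ definition above) =====
theorem consume_input_value_py_spec : Claim_equal_consume_input_value_py := by
  intro text start hdom hpre
  have h0 : (0 : Int) ≤ start := hpre
  unfold Spec_consume_input_value_py consume_input_value_py consume_input_value_py_alt
  dsimp only
  by_cases hge : start ≥ (text.toList.length : Int)
  · rw [if_pos hge, if_pos hge]
  · rw [if_neg hge, if_neg hge]
    have hlt : start.toNat < text.toList.length := by omega
    set cs := text.toList with hcs
    set s := start.toNat with hs
    rw [dif_pos hlt, List.drop_eq_getElem_cons hlt]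
    dsimp only
    by_cases hq : cs[s] = '\'' ∨ cs[s] = '"'
    · rw [if_pos hq, if_pos hq,
        bEatQuoted_drop cs (cs[s]) cs.length (s + 1) (by omega),
        aQuoted_eq_iQuoted cs (cs[s]) cs.length cs.length cs.length (s + 1)
          (by omega) (by omega) (by omega) (by omega),
        List.length_drop]
      have hle := iQuoted_le cs (cs[s]) cs.length (s + 1)
      omega
    · rw [if_neg hq, if_neg hq]
      by_cases hbr : cs[s] = '[' ∨ cs[s] = '{'
      · rw [if_pos hbr, if_pos hbr,
          bEatNested_drop cs cs.length (if cs[s] = '[' then ']' else '}') (s + 1) (by omega),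
          aBracket_eq_applyStack cs cs.length cs.length (s + 1)
            [if cs[s] = '[' then ']' else '}'] (by omega) (by omega) (by omega) (by simp)
            (by
              intro x hx
              simp only [List.mem_singleton] at hx
              subst hx
              by_cases h' : cs[s] = '[' <;> simp [h']),
          List.length_drop]
        have hle := iNested_le cs (if cs[s] = '[' then ']' else '}') cs.length (s + 1)
        show ((applyStack cs [if cs[s] = '[' then ']' else '}'] (s + 1) : Nat) : Int) = _
        have hap : applyStack cs [if cs[s] = '[' then ']' else '}'] (s + 1)
            = iNested cs (if cs[s] = '[' then ']' else '}') cs.length (s + 1) := rfl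
        rw [hap]
        omega
      · rw [if_neg hbr, if_neg hbr, ← List.drop_eq_getElem_cons hlt,
          bEatBare_drop cs cs.length s (by omega),
          aBare_eq_iBare cs cs.length s, List.length_drop]
        have hle := iBare_le cs cs.length s (by omega)
        omega
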